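-- pv_equiv track=rewrite | github.com/pypi-data/pypi-mirror-85 | packages/Sympathy/Sympathy-2.2.0-py3-none-any.whl/sympathy/app/util.py | library_conflicts_worse
-- ===== SOURCE A (Python) =====
-- def library_conflicts_worse(old_conflicts, new_conflicts):
--     conflicts = 0
--     keys = set(old_conflicts)
--     keys.update(new_conflicts)
--
--     for key in keys:
--         old_value = old_conflicts.get(key, [])
--         new_value = new_conflicts.get(key, [])
--         conflicts += len(new_value) - len(old_value)
--     return conflicts > 0
-- ===== SOURCE B (Python) =====
-- def library_conflicts_worse(old_conflicts, new_conflicts):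
--     total_new = sum(len(v) for v in new_conflicts.values())
--     total_old = sum(len(v) for v in old_conflicts.values())
--     return total_new > total_old
-- ===== Notes on version B (the rewrite author's own statement) =====
-- stated objective: simpler
-- what changed: B drops A's union-of-keys set and the paired per-key difference pass, scanning each dict's values once for an independent total and comparing the two totals (the per-key differences telescope to total_new - total_old).
import Mathlib
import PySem

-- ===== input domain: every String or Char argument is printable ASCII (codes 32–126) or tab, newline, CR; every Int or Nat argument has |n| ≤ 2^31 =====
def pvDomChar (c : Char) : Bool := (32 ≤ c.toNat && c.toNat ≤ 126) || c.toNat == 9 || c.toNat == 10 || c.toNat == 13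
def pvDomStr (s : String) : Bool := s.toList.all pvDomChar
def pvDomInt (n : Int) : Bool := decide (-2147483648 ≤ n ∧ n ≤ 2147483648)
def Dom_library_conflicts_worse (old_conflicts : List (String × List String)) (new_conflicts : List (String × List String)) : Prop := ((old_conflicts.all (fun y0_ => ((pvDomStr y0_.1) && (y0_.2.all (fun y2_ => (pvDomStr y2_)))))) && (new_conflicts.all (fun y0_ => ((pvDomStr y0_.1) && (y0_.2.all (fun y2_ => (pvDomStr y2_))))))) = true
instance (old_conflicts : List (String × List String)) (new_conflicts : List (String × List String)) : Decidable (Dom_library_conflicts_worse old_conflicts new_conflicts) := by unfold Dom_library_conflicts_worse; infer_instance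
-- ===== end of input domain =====

-- B replaces A's union-of-keys paired difference pass by two independent value scans
-- (total_new > total_old); same result, simpler decomposition.

-- ===== PORT A =====
def library_conflicts_worse (old_conflicts : List (String × List String)) (new_conflicts : List (String × List String)) : Bool :=
  let keys : PySem.Set String :=
    PySem.Set.update (PySem.Set.ofList (old_conflicts.map Prod.fst)) (new_conflicts.map Prod.fst)
  let conflicts : Int :=
    keys.foldl (fun acc key =>
      let old_value := (PySem.Dict.mk old_conflicts).getD key []
      let new_value := (PySem.Dict.mk new_conflicts).getD key []
      acc + ((new_value.length : Int) - (old_value.length : Int))) 0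
  decide (conflicts > 0)

-- ===== PORT B =====
def library_conflicts_worse_alt (old_conflicts : List (String × List String)) (new_conflicts : List (String × List String)) : Bool :=
  let total_new : Int := (new_conflicts.map (fun p => (p.2.length : Int))).sum
  let total_old : Int := (old_conflicts.map (fun p => (p.2.length : Int))).sum
  decide (total_new > total_old)

-- ===== PRECONDITION & SPEC =====
-- Pre_ requires each association list to have distinct keys: the Python arguments are dicts,
-- which can never carry a duplicate key, so duplicate-key lists do not represent any Python input.
def Pre_library_conflicts_worse (old_conflicts : List (String × List String)) (new_conflicts : List (String × List String)) : Prop :=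
  (old_conflicts.map Prod.fst).Nodup ∧ (new_conflicts.map Prod.fst).Nodup
instance (old_conflicts : List (String × List String)) (new_conflicts : List (String × List String)) : Decidable (Pre_library_conflicts_worse old_conflicts new_conflicts) := by unfold Pre_library_conflicts_worse; infer_instance

def pvWitness_library_conflicts_worse : (List (String × List String)) × (List (String × List String)) :=
  ([("a", ["x"])], [("a", ["x", "y"]), ("b", ["z"])])

def Spec_library_conflicts_worse (old_conflicts : List (String × List String)) (new_conflicts : List (String × List String)) (out : Bool) : Prop := out = library_conflicts_worse_alt old_conflicts new_conflicts
instance (old_conflicts : List (String × List String)) (new_conflicts : List (String × List String)) (out : Bool) : Decidable (Spec_library_conflicts_worse old_conflicts new_conflicts out) := by unfold Spec_library_conflicts_worse; infer_instance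

-- ===== CLAIM (what is proved, stated in full; the proofs are below) =====
def Claim_equal_library_conflicts_worse : Prop := ∀ (old_conflicts : List (String × List String)) (new_conflicts : List (String × List String)), Dom_library_conflicts_worse old_conflicts new_conflicts → Pre_library_conflicts_worse old_conflicts new_conflicts → Spec_library_conflicts_worse old_conflicts new_conflicts (library_conflicts_worse old_conflicts new_conflicts)

-- ===== LEMMAS AND PROOFS =====

-- Summing `if k₀ == k then a else g k` over a duplicate-free list containing k₀,
-- when g vanishes at k₀, counts a once and g everywhere.
lemma pv_sum_if_mem (S : List String) (k₀ : String) (a : Int) (g : String → Int)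
    (hn : S.Nodup) (hk : k₀ ∈ S) (h0 : g k₀ = 0) :
    (S.map (fun k => if k₀ == k then a else g k)).sum = a + (S.map g).sum := by
  induction S with
  | nil => cases hk
  | cons h t ih =>
    rcases List.mem_cons.mp hk with rfl | hkt
    · have hnt : k₀ ∉ t := (List.nodup_cons.mp hn).1
      have ht : t.map (fun k => if k₀ == k then a else g k) = t.map g := by
        apply List.map_congr_left
        intro x hx
        have hne : (k₀ == x) = false := beq_eq_false_iff_ne.mpr (fun h => hnt (h ▸ hx))
        rw [hne]; simp
      rw [List.map_cons, List.sum_cons, List.map_cons, List.sum_cons,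
          if_pos (beq_self_eq_true k₀), ht, h0]
      ring
    · have hne : k₀ ≠ h := by
        rintro rfl; exact (List.nodup_cons.mp hn).1 hkt
      have hbne : (k₀ == h) = false := beq_eq_false_iff_ne.mpr hne
      rw [List.map_cons, List.sum_cons, List.map_cons, List.sum_cons,
          if_neg (by rw [hbne]; exact Bool.false_ne_true),
          ih (List.nodup_cons.mp hn).2 hkt]
      ring

lemma pv_sum_map_sub (S : List String) (f g : String → Int) :
    (S.map (fun k => f k - g k)).sum = (S.map f).sum - (S.map g).sum := by
  induction S with
  | nil => simp
  | cons h t ih => simp [ih]; ring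

-- Summing the looked-up value lengths over any duplicate-free superset of the keys
-- gives the total length of all stored values.
lemma pv_sum_getD (d : List (String × List String)) (S : List String)
    (hnS : S.Nodup) (hnd : (d.map Prod.fst).Nodup) (hsub : ∀ k ∈ d.map Prod.fst, k ∈ S) :
    (S.map (fun k => (((PySem.Dict.mk d).getD k []).length : Int))).sum
      = (d.map (fun p => (p.2.length : Int))).sum := by
  induction d with
  | nil => simp [PySem.Dict.getD, PySem.Dict.get?]
  | cons p d' ih =>
    obtain ⟨k₀, v₀⟩ := p
    have hnd' : (d'.map Prod.fst).Nodup := (List.nodup_cons.mp hnd).2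
    have hk₀ : k₀ ∈ S := hsub k₀ (by simp)
    have hsub' : ∀ k ∈ d'.map Prod.fst, k ∈ S := fun k hk => hsub k (by simp [hk])
    have hnotmem : k₀ ∉ (PySem.Dict.mk d').keys := by
      simpa using (List.nodup_cons.mp hnd).1
    have h0 : ((PySem.Dict.mk d').getD k₀ []).length = 0 := by
      have := (PySem.Dict.get?_eq_none_iff_not_mem_keys (PySem.Dict.mk d') k₀).mpr hnotmem
      simp [PySem.Dict.getD_eq_get?_getD, this]
    have hstep : S.map (fun k => (((PySem.Dict.mk ((k₀, v₀) :: d')).getD k []).length : Int))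
        = S.map (fun k => if k₀ == k then (v₀.length : Int)
                           else (((PySem.Dict.mk d').getD k []).length : Int)) := by
      apply List.map_congr_left; intro x _
      rw [PySem.Dict.getD_eq_get?_getD, PySem.Dict.get?_mk_cons]
      by_cases h : k₀ == x
      · simp [h]
      · simp [h, PySem.Dict.getD_eq_get?_getD]
    rw [hstep, pv_sum_if_mem S k₀ _ _ hnS hk₀ (by exact_mod_cast h0), ih hnd' hsub']
    simp

-- ===== VERDICT (by name: the statement is the Claim_ definition above) =====
theorem library_conflicts_worse_spec : Claim_equal_library_conflicts_worse := by
  intro old_conflicts new_conflicts _ hpre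
  simp only [Spec_library_conflicts_worse, library_conflicts_worse, library_conflicts_worse_alt]
  obtain ⟨hold, hnew⟩ := hpre
  set S : List String :=
    PySem.Set.update (PySem.Set.ofList (old_conflicts.map Prod.fst)) (new_conflicts.map Prod.fst) with hS
  have hnS : S.Nodup := PySem.Set.nodup_update _ _ (PySem.Set.nodup_ofList _)
  have hsubOld : ∀ k ∈ old_conflicts.map Prod.fst, k ∈ S := by
    intro k hk; rw [hS, PySem.Set.mem_update]; left; exact (PySem.Set.mem_ofList _ _).mpr hk
  have hsubNew : ∀ k ∈ new_conflicts.map Prod.fst, k ∈ S := by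
    intro k hk; rw [hS, PySem.Set.mem_update]; right; exact hk
  rw [PySem.List.foldl_add S (fun key =>
        ((((PySem.Dict.mk new_conflicts).getD key []).length : Int)
          - (((PySem.Dict.mk old_conflicts).getD key []).length : Int))) 0]
  rw [pv_sum_map_sub, pv_sum_getD new_conflicts S hnS hnew hsubNew,
      pv_sum_getD old_conflicts S hnS hold hsubOld]
  simp [gt_iff_lt]
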